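-- pv_equiv track=rewrite | github.com/wkmp26/connect-x | agent.py | sector_check
-- ===== SOURCE A (Python) =====
-- def sector_check(board, sector, iter):
--     max_count_1 = 0
--     max_count_2 = 0
--
--     for s in sector:
--         window = 0
--         count1 = 0
--         count2 = 0
--         one_stuck = False
--         two_stuck = False
--         while window < 4:
--             if board[s + window * iter] == 1:
--                 if not one_stuck:
--                     count1 += 1
--                 count2 = 0
--                 two_stuck = True
--             if board[s + window * iter] == 2:
--                 if not two_stuck:
--                     count2 += 1
--                 count1 = 0
--                 one_stuck = True
--
--             window += 1
--
--         max_count_1 = max(max_count_1, count1)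
--         max_count_2 = max(max_count_2, count2)
--
--         if max_count_1 == 4 or max_count_2 == 4:
--             return max_count_1, max_count_2
--
--     return max_count_1, max_count_2
-- ===== SOURCE B (Python) =====
-- def sector_check(board, sector, iter):
--     max_count_1 = 0
--     max_count_2 = 0
--     for s in sector:
--         window = [board[s + w * iter] for w in range(4)]
--         c1 = window.count(1)
--         c2 = window.count(2)
--         if c1 and c2:
--             c1 = 0
--             c2 = 0
--         max_count_1 = max(max_count_1, c1)
--         max_count_2 = max(max_count_2, c2)
--         if max_count_1 == 4 or max_count_2 == 4:
--             return max_count_1, max_count_2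
--     return max_count_1, max_count_2
-- ===== Notes on version B (the rewrite author's own statement) =====
-- stated objective: simpler
-- what changed: Replaces the stateful one_stuck/two_stuck scan with per-window materialization: build the four cells, count 1s and 2s, and zero both counts when both players appear in the window.
-- outside the precondition, e.g. on sector_check([1, 1, 1, 1], [0, 100], 1): A returns (4, 0), B returns (4, 0)
import Mathlib
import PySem

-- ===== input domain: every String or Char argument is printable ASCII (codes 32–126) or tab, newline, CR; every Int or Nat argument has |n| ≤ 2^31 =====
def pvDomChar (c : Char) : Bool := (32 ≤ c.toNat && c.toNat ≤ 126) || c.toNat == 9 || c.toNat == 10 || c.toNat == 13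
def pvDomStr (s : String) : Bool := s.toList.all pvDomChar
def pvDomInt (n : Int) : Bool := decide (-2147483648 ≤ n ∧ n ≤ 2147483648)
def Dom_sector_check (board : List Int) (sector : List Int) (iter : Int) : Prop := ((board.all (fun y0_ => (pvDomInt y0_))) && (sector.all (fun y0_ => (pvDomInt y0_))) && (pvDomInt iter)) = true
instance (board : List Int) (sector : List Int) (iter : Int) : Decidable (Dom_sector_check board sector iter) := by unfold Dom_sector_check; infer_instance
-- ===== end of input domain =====

-- B replaces A's stateful one_stuck/two_stuck scan by counting 1s and 2s in the
-- materialized 4-cell window and zeroing both counts when both players occur (objective: simpler).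


-- ===== PORT A =====
-- the inner 'while window < 4' loop; board[...] is pyGet? (its getD 0 is only reached
-- outside Pre_, where Python raises IndexError and nothing is claimed)
def pvAWhile (board : List Int) (s iter : Int) (window : Nat)
    (count1 count2 : Int) (one_stuck two_stuck : Bool) : Int × Int :=
  if window < 4 then
    let v := (PySem.List.pyGet? board (s + (window : Int) * iter)).getD 0
    let count1 := if v = 1 then (if !one_stuck then count1 + 1 else count1) else count1
    let count2 := if v = 1 then 0 else count2
    let two_stuck := if v = 1 then true else two_stuck
    let count2 := if v = 2 then (if !two_stuck then count2 + 1 else count2) else count2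
    let count1 := if v = 2 then 0 else count1
    let one_stuck := if v = 2 then true else one_stuck
    pvAWhile board s iter (window + 1) count1 count2 one_stuck two_stuck
  else (count1, count2)
termination_by 4 - window

-- the 'for s in sector' loop with the early return
def pvAFor (board : List Int) (iter : Int) (sector : List Int)
    (max_count_1 max_count_2 : Int) : Int × Int :=
  match sector with
  | [] => (max_count_1, max_count_2)
  | s :: rest =>
    let (count1, count2) := pvAWhile board s iter 0 0 0 false false
    let max_count_1 := max max_count_1 count1
    let max_count_2 := max max_count_2 count2
    if max_count_1 = 4 ∨ max_count_2 = 4 then (max_count_1, max_count_2)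
    else pvAFor board iter rest max_count_1 max_count_2

def sector_check (board : List Int) (sector : List Int) (iter : Int) : Int × Int :=
  pvAFor board iter sector 0 0

-- ===== PORT B =====
-- window = [board[s + w*iter] for w in range(4)]; c1/c2 = window.count(1/2); both present → both 0
def pvBSector (board : List Int) (s iter : Int) : Int × Int :=
  let window := (PySem.List.pyRange 0 4 1).map
    (fun w => (PySem.List.pyGet? board (s + w * iter)).getD 0)
  let c1 := (PySem.List.count window 1 : Int)
  let c2 := (PySem.List.count window 2 : Int)
  if c1 ≠ 0 ∧ c2 ≠ 0 then (0, 0) else (c1, c2)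

def pvBFor (board : List Int) (iter : Int) (sector : List Int)
    (m1 m2 : Int) : Int × Int :=
  match sector with
  | [] => (m1, m2)
  | s :: rest =>
    let (c1, c2) := pvBSector board s iter
    let m1 := max m1 c1
    let m2 := max m2 c2
    if m1 = 4 ∨ m2 = 4 then (m1, m2) else pvBFor board iter rest m1 m2

def sector_check_alt (board : List Int) (sector : List Int) (iter : Int) : Int × Int :=
  pvBFor board iter sector 0 0

-- ===== PRECONDITION & SPEC =====
-- Pre_ excludes inputs where board[s + w*iter] raises IndexError in Python.  It is the
-- conservative closed form (every window index of every sector start is in range); this also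
-- excludes runs where A's early return fires before a bad start is reached, since the exact
-- returning set cannot be stated without simulating the loop.
def Pre_sector_check (board : List Int) (sector : List Int) (iter : Int) : Prop :=
  ∀ s ∈ sector, ∀ w ∈ ([0, 1, 2, 3] : List Int),
    PySem.Raise.InRange board.length (s + w * iter)
instance (board : List Int) (sector : List Int) (iter : Int) : Decidable (Pre_sector_check board sector iter) := by unfold Pre_sector_check; infer_instance

def pvWitness_sector_check : List Int × List Int × Int := ([1, 1, 0, 2, 2, 2], [0, 2, -6], 1)

def Spec_sector_check (board : List Int) (sector : List Int) (iter : Int) (out : Int × Int) : Prop := out = sector_check_alt board sector iter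
instance (board : List Int) (sector : List Int) (iter : Int) (out : Int × Int) : Decidable (Spec_sector_check board sector iter out) := by unfold Spec_sector_check; infer_instance

-- ===== CLAIM (what is proved, stated in full; the proofs are below) =====
def Claim_equal_sector_check : Prop := ∀ (board : List Int) (sector : List Int) (iter : Int), Dom_sector_check board sector iter → Pre_sector_check board sector iter → Spec_sector_check board sector iter (sector_check board sector iter)

-- ===== LEMMAS AND PROOFS =====

-- A's inner loop re-expressed as structural recursion over the explicit list of cell values
def pvGA : List Int → Int → Int → Bool → Bool → Int × Int
  | [], count1, count2, _, _ => (count1, count2)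
  | v :: vs, count1, count2, one_stuck, two_stuck =>
    let count1' := if v = 1 then (if !one_stuck then count1 + 1 else count1) else count1
    let count2' := if v = 1 then 0 else count2
    let two_stuck' := if v = 1 then true else two_stuck
    let count2'' := if v = 2 then (if !two_stuck' then count2' + 1 else count2') else count2'
    let count1'' := if v = 2 then 0 else count1'
    let one_stuck' := if v = 2 then true else one_stuck
    pvGA vs count1'' count2'' one_stuck' two_stuck'

lemma pvBridge (board : List Int) (s iter : Int) :
    ∀ (k w : Nat), w + k = 4 → ∀ c1 c2 os ts,
      pvAWhile board s iter w c1 c2 os ts =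
      pvGA ((List.range k).map (fun j =>
        (PySem.List.pyGet? board (s + ((w + j : Nat) : Int) * iter)).getD 0)) c1 c2 os ts := by
  intro k
  induction k with
  | zero =>
    intro w hw c1 c2 os ts
    rw [pvAWhile]
    simp [show ¬ (w < 4) by omega, pvGA]
  | succ k ih =>
    intro w hw c1 c2 os ts
    rw [pvAWhile]
    rw [if_pos (by omega)]
    rw [List.range_succ_eq_map]
    simp only [List.map_cons, List.map_map, pvGA, Nat.add_zero]
    rw [ih (w + 1) (by omega)]
    congr 1
    apply List.map_congr_left
    intro j hj
    simp only [Function.comp_apply, Nat.succ_eq_add_one]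
    congr 2
    push_cast
    ring

-- per-window agreement: A's stuck-flag scan equals B's count-and-zero rule
set_option maxHeartbeats 2000000 in
lemma pvInner_eq (board : List Int) (s iter : Int) :
    pvAWhile board s iter 0 0 0 false false = pvBSector board s iter := by
  have hr : PySem.List.pyRange 0 4 1 = [0, 1, 2, 3] := by decide
  have h := pvBridge board s iter 4 0 rfl 0 0 false false
  rw [h]
  simp only [pvBSector, hr, List.map]
  norm_num [List.range_succ, PySem.List.count, List.count_cons]
  generalize (PySem.List.pyGet? board (s + iter)).getD 0 = v1
  generalize (PySem.List.pyGet? board (s + 2 * iter)).getD 0 = v2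
  generalize (PySem.List.pyGet? board (s + 3 * iter)).getD 0 = v3
  generalize (PySem.List.pyGet? board s).getD 0 = v0
  by_cases h01 : v0 = 1 <;> by_cases h02 : v0 = 2 <;>
  by_cases h11 : v1 = 1 <;> by_cases h12 : v1 = 2 <;>
  by_cases h21 : v2 = 1 <;> by_cases h22 : v2 = 2 <;>
  by_cases h31 : v3 = 1 <;> by_cases h32 : v3 = 2 <;>
  simp_all [pvGA]

lemma pvFor_eq (board : List Int) (iter : Int) (sector : List Int) (m1 m2 : Int) :
    pvAFor board iter sector m1 m2 = pvBFor board iter sector m1 m2 := by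
  induction sector generalizing m1 m2 with
  | nil => rfl
  | cons s rest ih =>
    simp only [pvAFor, pvBFor, pvInner_eq]
    split <;> simp [ih]

-- ===== VERDICT (by name: the statement is the Claim_ definition above) =====
theorem sector_check_spec : Claim_equal_sector_check := by
  intro board sector iter _ _
  unfold Spec_sector_check sector_check sector_check_alt
  exact pvFor_eq board iter sector 0 0
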